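-- pv_equiv track=rewrite | github.com/NotAlpha45/Snakes-and-ladders | player.py | block_number
-- ===== SOURCE A (Python) =====
-- def in_position(x, y, x1, y1, x2, y2):
--     """
--     Parameters: x, y, x1, y1, x2, y2 (coordiantes of a point and two other check points)\n
--     Action: Chcks if (x,y) is beteen (x1, y1) and (x2, y2)
--     """
--     if x1 <= x <= x2 and y1 <= y <= y2:
--         return True
--     else:
--         return False
--
-- def block_number(x, y):
--     """
--     Parameters : x, y ( x and y coordinate of a point)\n
--     Action : Returns the block number in which the point is.
--     """
--     # block_coor is a list of all the blocks of the game board with their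
--     # (x1, y1) and (x2, y2) coordinates and their sequence number. Tuple
--     # format (x1, y1, x2, y2, number)
--     block_coor = [
--         (0, 0, 80, 80, 21),  # 1
--         (84, 0, 164, 80, 22),  # 2
--         (168, 0, 244, 80, 23),  # 3
--         (248, 0, 328, 80, 24),  # 4
--         (332, 0, 412, 80, 25),  # 5
--         (0, 84, 80, 164, 20),  # 6
--         (84, 84, 164, 164, 19),  # 7
--         (168, 84, 244, 164, 18),  # 8
--         (248, 84, 328, 164, 17),  # 9
--         (332, 84, 412, 164, 16),  # 10
--         (0, 168, 80, 244, 11),  # 11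
--         (84, 168, 164, 244, 12),  # 12
--         (168, 168, 244, 244, 13),  # 13
--         (248, 168, 328, 244, 14),  # 14
--         (332, 168, 412, 244, 15),  # 15
--         (0, 248, 80, 328, 10),  # 16
--         (84, 248, 164, 328, 9),  # 17
--         (168, 248, 244, 328, 8),  # 18
--         (248, 248, 328, 328, 7),  # 19
--         (332, 248, 412, 328, 6),  # 20
--         (0, 332, 80, 412, 1),  # 21
--         (84, 332, 164, 412, 2),  # 22
--         (168, 332, 244, 412, 3),  # 23
--         (248, 332, 328, 412, 4),  # 24
--         (332, 332, 412, 412, 5),  # 25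
--     ]
--     for section in block_coor:
--         x1 = section[0]
--         y1 = section[1]
--         x2 = section[2]
--         y2 = section[3]
--         number = section[4]
--         if in_position(x, y, x1, y1, x2, y2):
--             return number
-- ===== SOURCE B (Python) =====
-- def _cell(v):
--     # 1-D cell index along either axis (the x and y gridlines are identical).
--     if 0 <= v <= 80:
--         return 0
--     if 84 <= v <= 164:
--         return 1
--     if 168 <= v <= 244:
--         return 2
--     if 248 <= v <= 328:
--         return 3
--     if 332 <= v <= 412:
--         return 4
--     return None
--
-- def block_number(x, y):
--     col = _cell(x)
--     row = _cell(y)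
--     if col is None or row is None:
--         return None
--     r = 4 - row                      # board row counted from the bottom
--     return r * 5 + (col + 1 if r % 2 == 0 else 5 - col)  # boustrophedon numbering
-- ===== Notes on version B (the rewrite author's own statement) =====
-- stated objective: simpler
-- what changed: Replaces the 25-entry 2-D rectangle table scan with two 1-D cell lookups (one per axis, 5 intervals each) combined by the closed-form boustrophedon numbering r*5 + (col+1 or 5-col).
import Mathlib
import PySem

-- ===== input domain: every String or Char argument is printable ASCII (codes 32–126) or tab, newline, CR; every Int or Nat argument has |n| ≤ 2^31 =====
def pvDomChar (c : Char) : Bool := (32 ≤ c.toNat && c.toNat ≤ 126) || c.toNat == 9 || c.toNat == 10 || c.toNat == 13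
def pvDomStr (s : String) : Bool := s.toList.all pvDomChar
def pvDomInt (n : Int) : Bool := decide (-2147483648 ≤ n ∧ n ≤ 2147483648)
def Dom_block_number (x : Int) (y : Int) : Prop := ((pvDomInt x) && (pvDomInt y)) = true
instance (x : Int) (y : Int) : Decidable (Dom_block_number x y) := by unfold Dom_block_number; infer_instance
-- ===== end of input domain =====

-- B replaces A's 25-rectangle table scan by two 1-D interval lookups plus the
-- closed-form boustrophedon numbering (objective: simpler).

-- ===== PORT A =====
def in_position (x y x1 y1 x2 y2 : Int) : Bool :=
  if x1 ≤ x ∧ x ≤ x2 ∧ y1 ≤ y ∧ y ≤ y2 then true else false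

def pvBlockCoor : List (Int × Int × Int × Int × Int) :=
  [ (0, 0, 80, 80, 21), (84, 0, 164, 80, 22), (168, 0, 244, 80, 23),
    (248, 0, 328, 80, 24), (332, 0, 412, 80, 25),
    (0, 84, 80, 164, 20), (84, 84, 164, 164, 19), (168, 84, 244, 164, 18),
    (248, 84, 328, 164, 17), (332, 84, 412, 164, 16),
    (0, 168, 80, 244, 11), (84, 168, 164, 244, 12), (168, 168, 244, 244, 13),
    (248, 168, 328, 244, 14), (332, 168, 412, 244, 15),
    (0, 248, 80, 328, 10), (84, 248, 164, 328, 9), (168, 248, 244, 328, 8),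
    (248, 248, 328, 328, 7), (332, 248, 412, 328, 6),
    (0, 332, 80, 412, 1), (84, 332, 164, 412, 2), (168, 332, 244, 412, 3),
    (248, 332, 328, 412, 4), (332, 332, 412, 412, 5) ]

-- the 'for section in block_coor: … return number' loop (falls off the end → None)
def pvBlockLoop (x y : Int) : List (Int × Int × Int × Int × Int) → Option Int
  | [] => none
  | (x1, y1, x2, y2, number) :: rest =>
      if in_position x y x1 y1 x2 y2 then some number else pvBlockLoop x y rest

def block_number (x : Int) (y : Int) : Option Int :=
  pvBlockLoop x y pvBlockCoor

-- ===== PORT B =====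
def pvCell (v : Int) : Option Int :=
  if 0 ≤ v ∧ v ≤ 80 then some 0
  else if 84 ≤ v ∧ v ≤ 164 then some 1
  else if 168 ≤ v ∧ v ≤ 244 then some 2
  else if 248 ≤ v ∧ v ≤ 328 then some 3
  else if 332 ≤ v ∧ v ≤ 412 then some 4
  else none

def block_number_alt (x : Int) (y : Int) : Option Int :=
  match pvCell x, pvCell y with
  | some col, some row =>
      let r : Int := 4 - row
      some (r * 5 + (if r % 2 = 0 then col + 1 else 5 - col))
  | _, _ => none

-- ===== PRECONDITION & SPEC =====
def Spec_block_number (x : Int) (y : Int) (out : Option Int) : Prop := out = block_number_alt x y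
instance (x : Int) (y : Int) (out : Option Int) : Decidable (Spec_block_number x y out) := by unfold Spec_block_number; infer_instance

-- ===== CLAIM (what is proved, stated in full; the proofs are below) =====
def Claim_equal_block_number : Prop := ∀ (x : Int) (y : Int), Dom_block_number x y → Spec_block_number x y (block_number x y)

-- ===== LEMMAS AND PROOFS =====
lemma in_position_eq (x y x1 y1 x2 y2 : Int) :
    (in_position x y x1 y1 x2 y2 = true) ↔ (x1 ≤ x ∧ x ≤ x2 ∧ y1 ≤ y ∧ y ≤ y2) := by
  simp [in_position]

-- every integer coordinate falls in exactly one of the five grid cells or in no cell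
lemma pvCell6 (v : Int) :
    (0 ≤ v ∧ v ≤ 80) ∨ (84 ≤ v ∧ v ≤ 164) ∨ (168 ≤ v ∧ v ≤ 244) ∨
    (248 ≤ v ∧ v ≤ 328) ∨ (332 ≤ v ∧ v ≤ 412) ∨
    (v < 0 ∨ (80 < v ∧ v < 84) ∨ (164 < v ∧ v < 168) ∨ (244 < v ∧ v < 248) ∨
     (328 < v ∧ v < 332) ∨ 412 < v) := by
  omega

-- ===== VERDICT (by name: the statement is the Claim_ definition above) =====
set_option maxHeartbeats 4000000 in
theorem block_number_spec : Claim_equal_block_number := by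
  intro x y _
  unfold Spec_block_number
  rcases pvCell6 x with hx | hx | hx | hx | hx | hx <;>
    rcases pvCell6 y with hy | hy | hy | hy | hy | hy <;>
    · simp only [block_number, pvBlockLoop, pvBlockCoor, block_number_alt, pvCell]
      repeat' first
        | rw [if_neg (by (try simp only [in_position_eq]); omega)]
        | rw [if_pos (by (try simp only [in_position_eq]); omega)]
      try norm_num
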